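-- pv_equiv track=rewrite | github.com/chuntse0514/VQE-for-Fermi-Hubbard-model | Fermionic_Gaussian_state.py | get_neighbor_site_list
-- ===== SOURCE A (Python) =====
-- def get_neighbor_site_list(m, n, boundary_condiction='periodic'):
--     """
--     objective:
--         To get a list that specifies the index of the neighbor of any vertex in the graph
--     """
--
--     neighbor_site_indicies = []
--
--     # the index of the graph is specified as following example
--     #
--     #      0   1   2   3   4
--     #      5   6   7   8   9
--     #      10  11  12  13  14
--     #      15  16  17  18  19
--
--     if boundary_condiction == 'periodic':
--
--         for i in range(m*n):
--
--             neighbor_list = []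
--
--             neighbor_list.append((i-n) % (m*n))
--
--             neighbor_list.append((i+n) % (m*n))
--
--             if i % n != 0:
--                 neighbor_list.append(i-1)
--             else:
--                 neighbor_list.append(i-1+n)
--
--             if i % n != n-1:
--                 neighbor_list.append(i+1)
--             else:
--                 neighbor_list.append(i+1-n)
--
--             neighbor_site_indicies.append(neighbor_list)
--
--     elif boundary_condiction == 'open':
--
--         for i in range(m*n):
--
--             neighbor_list = []
--             # add the up neighbor
--             if i // n != 0:
--                 neighbor_list.append(i-n)
--
--             # add the down neighbor
--             if i // n < m-1:
--                 neighbor_list.append(i+n)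
--
--             # add the left neighbor
--             if i % n != 0:
--                 neighbor_list.append(i-1)
--
--             # add the right neighbor
--             if i % n != n-1:
--                 neighbor_list.append(i+1)
--
--             neighbor_site_indicies.append(neighbor_list)
--
--     return neighbor_site_indicies
-- ===== SOURCE B (Python) =====
-- def get_neighbor_site_list(m, n, boundary_condiction='periodic'):
--     mn = m * n
--     if boundary_condiction == 'periodic':
--         ups    = [(i - n) % mn for i in range(mn)]
--         downs  = [(i + n) % mn for i in range(mn)]
--         lefts  = [i - 1 if i % n != 0 else i - 1 + n for i in range(mn)]
--         rights = [i + 1 if i % n != n - 1 else i + 1 - n for i in range(mn)]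
--         return [list(t) for t in zip(ups, downs, lefts, rights)]
--     elif boundary_condiction == 'open':
--         ups    = [i - n if i // n != 0 else None for i in range(mn)]
--         downs  = [i + n if i // n < m - 1 else None for i in range(mn)]
--         lefts  = [i - 1 if i % n != 0 else None for i in range(mn)]
--         rights = [i + 1 if i % n != n - 1 else None for i in range(mn)]
--         return [[x for x in t if x is not None] for t in zip(ups, downs, lefts, rights)]
--     return []
-- ===== Notes on version B (the rewrite author's own statement) =====
-- stated objective: alternative
-- what changed: B replaces A's single per-site loop (appending one 4-element list per iteration) with a staged, column-wise decomposition: it first builds four whole-grid direction lists (up, down, left, right; Option-valued for the open boundary), then zips them and combines each 4-tuple into the per-site neighbor list.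
import Mathlib
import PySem

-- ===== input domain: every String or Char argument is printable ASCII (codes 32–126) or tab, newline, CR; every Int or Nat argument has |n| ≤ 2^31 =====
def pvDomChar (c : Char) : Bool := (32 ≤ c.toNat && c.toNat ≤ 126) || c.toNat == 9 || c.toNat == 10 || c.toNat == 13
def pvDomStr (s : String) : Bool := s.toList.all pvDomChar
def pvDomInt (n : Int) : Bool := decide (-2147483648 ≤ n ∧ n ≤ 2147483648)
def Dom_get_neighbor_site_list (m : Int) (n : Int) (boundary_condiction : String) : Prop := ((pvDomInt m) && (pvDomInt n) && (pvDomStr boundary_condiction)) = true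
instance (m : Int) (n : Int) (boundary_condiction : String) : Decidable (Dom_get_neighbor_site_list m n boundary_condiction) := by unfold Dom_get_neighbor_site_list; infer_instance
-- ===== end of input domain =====

-- B replaces A's single per-site loop by four whole-grid direction passes (up/down/left/right
-- columns) combined with a zip; same cost (objective: alternative decomposition).


-- ===== PORT A =====
def get_neighbor_site_list (m : Int) (n : Int) (boundary_condiction : String) : List (List Int) :=
  if boundary_condiction == "periodic" then
    (PySem.List.pyRange 0 (m * n) 1).foldl (fun acc i =>
      acc ++ [[PySem.Int.mod (i - n) (m * n),
               PySem.Int.mod (i + n) (m * n),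
               if PySem.Int.mod i n ≠ 0 then i - 1 else i - 1 + n,
               if PySem.Int.mod i n ≠ n - 1 then i + 1 else i + 1 - n]]) []
  else if boundary_condiction == "open" then
    (PySem.List.pyRange 0 (m * n) 1).foldl (fun acc i =>
      acc ++ [(((([] : List Int)
        ++ (if PySem.Int.floordiv i n ≠ 0 then [i - n] else []))
        ++ (if PySem.Int.floordiv i n < m - 1 then [i + n] else []))
        ++ (if PySem.Int.mod i n ≠ 0 then [i - 1] else []))
        ++ (if PySem.Int.mod i n ≠ n - 1 then [i + 1] else [])]) []
  else []

-- ===== PORT B =====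
-- tail-recursive port of Python's zip over four parallel lists (accumulator + reverse)
def pvZip4Aux {α β γ δ : Type} (acc : List (α × β × γ × δ)) :
    List α → List β → List γ → List δ → List (α × β × γ × δ)
  | a :: as, b :: bs, c :: cs, d :: ds => pvZip4Aux ((a, b, c, d) :: acc) as bs cs ds
  | _, _, _, _ => acc.reverse

def pvZip4 {α β γ δ : Type} (l₁ : List α) (l₂ : List β) (l₃ : List γ) (l₄ : List δ) :
    List (α × β × γ × δ) := pvZip4Aux [] l₁ l₂ l₃ l₄

def get_neighbor_site_list_alt (m : Int) (n : Int) (boundary_condiction : String) : List (List Int) :=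
  let mn := m * n
  if boundary_condiction == "periodic" then
    let rng := PySem.List.pyRange 0 mn 1
    let ups    := rng.map (fun i => PySem.Int.mod (i - n) mn)
    let downs  := rng.map (fun i => PySem.Int.mod (i + n) mn)
    let lefts  := rng.map (fun i => if PySem.Int.mod i n ≠ 0 then i - 1 else i - 1 + n)
    let rights := rng.map (fun i => if PySem.Int.mod i n ≠ n - 1 then i + 1 else i + 1 - n)
    (pvZip4 ups downs lefts rights).map
      (fun t => [t.1, t.2.1, t.2.2.1, t.2.2.2])
  else if boundary_condiction == "open" then
    let rng := PySem.List.pyRange 0 mn 1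
    let ups    := rng.map (fun i => if PySem.Int.floordiv i n ≠ 0 then some (i - n) else none)
    let downs  := rng.map (fun i => if PySem.Int.floordiv i n < m - 1 then some (i + n) else none)
    let lefts  := rng.map (fun i => if PySem.Int.mod i n ≠ 0 then some (i - 1) else none)
    let rights := rng.map (fun i => if PySem.Int.mod i n ≠ n - 1 then some (i + 1) else none)
    (pvZip4 ups downs lefts rights).map
      (fun t => ([t.1, t.2.1, t.2.2.1, t.2.2.2] : List (Option Int)).filterMap id)
  else []

-- ===== PRECONDITION & SPEC =====
def Spec_get_neighbor_site_list (m : Int) (n : Int) (boundary_condiction : String) (out : List (List Int)) : Prop := out = get_neighbor_site_list_alt m n boundary_condiction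
instance (m : Int) (n : Int) (boundary_condiction : String) (out : List (List Int)) : Decidable (Spec_get_neighbor_site_list m n boundary_condiction out) := by unfold Spec_get_neighbor_site_list; infer_instance

-- ===== CLAIM (what is proved, stated in full; the proofs are below) =====
def Claim_equal_get_neighbor_site_list : Prop := ∀ (m : Int) (n : Int) (boundary_condiction : String), Dom_get_neighbor_site_list m n boundary_condiction → Spec_get_neighbor_site_list m n boundary_condiction (get_neighbor_site_list m n boundary_condiction)

-- ===== LEMMAS AND PROOFS =====

-- zipping four maps over the same list is one map of the 4-tuple of the functions
theorem pv_zip4Aux_map {α β₁ β₂ β₃ β₄ : Type} (l : List α) (acc : List (β₁ × β₂ × β₃ × β₄))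
    (f₁ : α → β₁) (f₂ : α → β₂) (f₃ : α → β₃) (f₄ : α → β₄) :
    pvZip4Aux acc (l.map f₁) (l.map f₂) (l.map f₃) (l.map f₄)
      = acc.reverse ++ l.map (fun x => (f₁ x, (f₂ x, (f₃ x, f₄ x)))) := by
  induction l generalizing acc with
  | nil => simp [pvZip4Aux]
  | cons a t ih => simp [pvZip4Aux, ih]

theorem pv_zip4_map {α β₁ β₂ β₃ β₄ : Type} (l : List α)
    (f₁ : α → β₁) (f₂ : α → β₂) (f₃ : α → β₃) (f₄ : α → β₄) :
    pvZip4 (l.map f₁) (l.map f₂) (l.map f₃) (l.map f₄)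
      = l.map (fun x => (f₁ x, (f₂ x, (f₃ x, f₄ x)))) := by
  simp [pvZip4, pv_zip4Aux_map]

-- an optional kept-or-dropped element, as its list
theorem pv_opt_toList {c : Prop} [Decidable c] (v : Int) :
    (if c then [v] else []) = (if c then some v else none).toList := by
  split <;> rfl

-- filterMap id on a 4-element option list is the concatenation of the four toLists
theorem pv_filterMap4 (o₁ o₂ o₃ o₄ : Option Int) :
    ([o₁, o₂, o₃, o₄] : List (Option Int)).filterMap id
      = o₁.toList ++ o₂.toList ++ o₃.toList ++ o₄.toList := by
  cases o₁ <;> cases o₂ <;> cases o₃ <;> cases o₄ <;> rfl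

-- ===== VERDICT (by name: the statement is the Claim_ definition above) =====
theorem get_neighbor_site_list_spec : Claim_equal_get_neighbor_site_list := by
  intro m n bc _
  show get_neighbor_site_list m n bc = get_neighbor_site_list_alt m n bc
  unfold get_neighbor_site_list get_neighbor_site_list_alt
  by_cases hp : bc == "periodic"
  · rw [if_pos hp, if_pos hp, PySem.List.foldl_append_singleton_eq_map, List.nil_append]
    simp only [pv_zip4_map, List.map_map]
    rfl
  · rw [if_neg hp, if_neg hp]
    by_cases ho : bc == "open"
    · rw [if_pos ho, if_pos ho, PySem.List.foldl_append_singleton_eq_map, List.nil_append]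
      simp only [pv_zip4_map, List.map_map]
      apply List.map_congr_left
      intro i _
      simp only [Function.comp]
      rw [pv_filterMap4]
      simp only [List.nil_append]
      rw [pv_opt_toList (c := PySem.Int.floordiv i n ≠ 0),
          pv_opt_toList (c := PySem.Int.floordiv i n < m - 1),
          pv_opt_toList (c := PySem.Int.mod i n ≠ 0),
          pv_opt_toList (c := PySem.Int.mod i n ≠ n - 1)]
    · rw [if_neg ho, if_neg ho]
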